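-- pv_equiv track=rewrite | github.com/alanshibu123/Dark-Web-Monitoring-for-Agricultural-Assets | backup.py | _create_word_chunks
-- ===== SOURCE A (Python) =====
-- from typing import List, Dict, Set, Tuple, Optional, Any
-- from typing import List, Dict, Set, Tuple, Optional, Any
--
-- def _create_word_chunks(words: List[str], max_chunk_size: int = 4) -> List[str]:
--     """
--     Create chunks of consecutive words for fuzzy matching
--
--     Args:
--         words: List of words
--         max_chunk_size: Maximum number of words in a chunk
--
--     Returns:
--         List of word chunks as strings
--     """
--     chunks = []
--
--     # Single words
--     chunks.extend(words)
--
--     # Multi-word chunks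
--     for size in range(2, max_chunk_size + 1):
--         for i in range(len(words) - size + 1):
--             chunk = ' '.join(words[i:i+size])
--             chunks.append(chunk)
--
--     return chunks
-- ===== SOURCE B (Python) =====
-- from typing import List
--
--
-- def _create_word_chunks(words: List[str], max_chunk_size: int = 4) -> List[str]:
--     """Incremental version: grow each previous-size chunk by one word instead of
--     re-joining every window from scratch."""
--     chunks = list(words)
--     prev = list(words)
--     for size in range(2, max_chunk_size + 1):
--         prev = [p + ' ' + w for p, w in zip(prev, words[size - 1:])]
--         chunks.extend(prev)
--     return chunks
-- ===== Notes on version B (the rewrite author's own statement) =====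
-- stated objective: alternative
-- what changed: Instead of re-slicing and re-joining every window, B keeps a running row of previous-size chunk strings and extends each by one word (zip with a shifted view of words) per size level, preserving the exact size-major order.
import Mathlib
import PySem

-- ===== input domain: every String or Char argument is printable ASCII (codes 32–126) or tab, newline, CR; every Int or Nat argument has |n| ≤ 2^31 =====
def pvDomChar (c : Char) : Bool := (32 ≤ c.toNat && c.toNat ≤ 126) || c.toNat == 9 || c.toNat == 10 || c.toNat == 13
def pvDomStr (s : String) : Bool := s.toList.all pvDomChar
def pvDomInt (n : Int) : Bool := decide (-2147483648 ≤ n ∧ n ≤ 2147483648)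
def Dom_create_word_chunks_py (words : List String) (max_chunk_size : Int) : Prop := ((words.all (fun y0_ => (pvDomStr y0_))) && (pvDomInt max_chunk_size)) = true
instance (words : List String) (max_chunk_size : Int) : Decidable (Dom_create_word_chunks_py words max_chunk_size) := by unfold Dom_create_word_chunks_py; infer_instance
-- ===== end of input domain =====

-- B keeps a running row of previous-size chunk strings and extends each by one word per
-- size level, instead of re-slicing and re-joining every window (objective: alternative).

-- ===== PORT A =====
def create_word_chunks_py (words : List String) (max_chunk_size : Int) : List String :=
  -- chunks = []; chunks.extend(words)
  let chunks : List String := [] ++ words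
  -- for size in range(2, max_chunk_size + 1): for i in range(len(words) - size + 1): chunks.append(' '.join(words[i:i+size]))
  (PySem.List.pyRange 2 (max_chunk_size + 1) 1).foldl
    (fun chunks size =>
      (PySem.List.pyRange 0 ((words.length : Int) - size + 1) 1).foldl
        (fun chunks i =>
          chunks ++ [PySem.Str.join " " (PySem.List.slice words (some i) (some (i + size)))])
        chunks)
    chunks

-- ===== PORT B =====
def create_word_chunks_py_alt (words : List String) (max_chunk_size : Int) : List String :=
  -- chunks = list(words); prev = list(words)
  -- for size in range(2, max_chunk_size + 1):
  --   prev = [p + ' ' + w for p, w in zip(prev, words[size - 1:])]; chunks.extend(prev)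
  ((PySem.List.pyRange 2 (max_chunk_size + 1) 1).foldl
    (fun (st : List String × List String) size =>
      let prev := (st.2.zip (PySem.List.slice words (some (size - 1)) none)).map
        (fun pw => pw.1 ++ " " ++ pw.2)
      (st.1 ++ prev, prev))
    (words, words)).1

-- ===== PRECONDITION & SPEC =====
def Spec_create_word_chunks_py (words : List String) (max_chunk_size : Int) (out : List String) : Prop := out = create_word_chunks_py_alt words max_chunk_size
instance (words : List String) (max_chunk_size : Int) (out : List String) : Decidable (Spec_create_word_chunks_py words max_chunk_size out) := by unfold Spec_create_word_chunks_py; infer_instance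

-- ===== CLAIM (what is proved, stated in full; the proofs are below) =====
def Claim_equal_create_word_chunks_py : Prop := ∀ (words : List String) (max_chunk_size : Int), Dom_create_word_chunks_py words max_chunk_size → Spec_create_word_chunks_py words max_chunk_size (create_word_chunks_py words max_chunk_size)

-- ===== LEMMAS AND PROOFS =====

-- Windows of natural size k, as strings (the mathematical description of one row).
def pvWin (words : List String) (k : Nat) : List String :=
  (List.range (words.length + 1 - k)).map
    (fun i => PySem.Str.join " " ((words.drop i).take k))

theorem pvCharsJoin_concat (sep w : List Char) :
    ∀ (l : List (List Char)), l ≠ [] →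
      PySem.Chars.join sep (l ++ [w]) = PySem.Chars.join sep l ++ sep ++ w := by
  intro l
  induction l with
  | nil => intro h; exact absurd rfl h
  | cons p rest ih =>
    intro _
    cases rest with
    | nil =>
      simp [PySem.Chars.join_cons_cons, PySem.Chars.join_singleton]
    | cons q rest' =>
      have := ih (by simp)
      simp only [List.cons_append] at *
      rw [PySem.Chars.join_cons_cons, PySem.Chars.join_cons_cons, this]
      simp [List.append_assoc]

theorem pvStrJoin_concat (l : List String) (w : String) (h : l ≠ []) :
    PySem.Str.join " " (l ++ [w]) = PySem.Str.join " " l ++ " " ++ w := by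
  apply String.toList_injective
  simp only [PySem.Str.toList_join, List.map_append, List.map_cons, List.map_nil,
    String.toList_append]
  rw [pvCharsJoin_concat _ _ _ (by simpa using h)]

theorem pvWin_one (words : List String) : pvWin words 1 = words := by
  apply List.ext_getElem
  · simp [pvWin]
  · intro i h1 h2
    simp only [pvWin, List.getElem_map, List.getElem_range]
    have hi : i < words.length := by simpa [pvWin] using h1
    have hd : words.drop i = words[i] :: words.drop (i + 1) := List.drop_eq_getElem_cons hi
    rw [hd]
    simp only [List.take_succ_cons, List.take_zero]
    apply String.toList_injective
    simp [PySem.Str.toList_join, PySem.Chars.join_singleton]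

theorem pvWin_step (words : List String) (k : Nat) (hk : 1 ≤ k) :
    ((pvWin words k).zip (words.drop k)).map (fun pw => pw.1 ++ " " ++ pw.2)
      = pvWin words (k + 1) := by
  apply List.ext_getElem
  · simp [pvWin]; omega
  · intro i h1 h2
    have hlen : i < words.length - k := by
      simp only [List.length_map, List.length_zip, pvWin, List.length_range,
        List.length_drop] at h1
      omega
    have hik : i + k < words.length := by omega
    have hiw : i < (pvWin words k).length := by simp [pvWin]; omega
    have hid : i < (words.drop k).length := by simp; omega
    simp only [List.getElem_map, List.getElem_zip]
    simp only [pvWin, List.getElem_map, List.getElem_range, List.getElem_drop]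
    have htake : (words.drop i).take (k + 1) = (words.drop i).take k ++ [words[i + k]] := by
      rw [List.take_add_one]
      congr 1
      have : (words.drop i)[k]? = some words[i + k] := by
        rw [List.getElem?_drop]
        exact List.getElem?_eq_getElem (by omega)
      simp [this]
    rw [htake, pvStrJoin_concat]
    · congr 2
      omega
    · have : ((words.drop i).take k).length = k := by simp; omega
      intro hcon
      rw [hcon] at this
      simp at this
      omega

theorem pvFoldl_append_map (f : Int → String) (l : List Int) :
    ∀ (chunks : List String),
      l.foldl (fun c i => c ++ [f i]) chunks = chunks ++ l.map f := by
  induction l with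
  | nil => simp
  | cons x xs ih => intro chunks; simp [ih, List.append_assoc]

-- One row of A equals the window description.
theorem pvRowA_eq_win (words : List String) (s : Int) (hs : 1 ≤ s) :
    (PySem.List.pyRange 0 ((words.length : Int) - s + 1) 1).map
        (fun i => PySem.Str.join " " (PySem.List.slice words (some i) (some (i + s))))
      = pvWin words s.toNat := by
  apply List.ext_getElem
  · simp [pvWin, PySem.List.length_pyRange_one]
    omega
  · intro i h1 h2
    have hi : (i : Int) < (words.length : Int) - s + 1 := by
      have := h1
      simp only [List.length_map, PySem.List.length_pyRange_one] at this
      omega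
    simp only [List.getElem_map, PySem.List.getElem_pyRange_one, pvWin, List.getElem_range]
    simp only [zero_add]
    rw [PySem.List.slice_toNat words (by positivity) (by positivity)]
    have hnat : ((i : Int) + s).toNat = i + s.toNat := by omega
    have hsub : i + s.toNat - i = s.toNat := by omega
    simp [hnat, hsub]

-- The loop invariant: folding sizes s..s+c, A's chunks equal B's chunks when B's prev
-- holds the row of size s-1.
theorem pvLoop (words : List String) :
    ∀ (c : Nat) (s : Int) (chunks prev : List String), 2 ≤ s →
      prev = pvWin words (s.toNat - 1) →
      (PySem.List.pyRange s (s + c) 1).foldl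
        (fun chunks size =>
          (PySem.List.pyRange 0 ((words.length : Int) - size + 1) 1).foldl
            (fun chunks i =>
              chunks ++ [PySem.Str.join " " (PySem.List.slice words (some i) (some (i + size)))])
            chunks)
        chunks
      = ((PySem.List.pyRange s (s + c) 1).foldl
          (fun (st : List String × List String) size =>
            let prev := (st.2.zip (PySem.List.slice words (some (size - 1)) none)).map
              (fun pw => pw.1 ++ " " ++ pw.2)
            (st.1 ++ prev, prev))
          (chunks, prev)).1 := by
  intro c
  induction c with
  | zero =>
    intro s chunks prev _ _
    simp
  | succ c ih =>
    intro s chunks prev hs hprev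
    have hcons : PySem.List.pyRange s (s + (c + 1 : Nat)) 1
        = s :: PySem.List.pyRange (s + 1) (s + (c + 1 : Nat)) 1 :=
      PySem.List.pyRange_one_cons (by push_cast; omega)
    rw [hcons]
    simp only [List.foldl_cons]
    have hslice : PySem.List.slice words (some (s - 1)) none
        = words.drop (s - 1).toNat := PySem.List.slice_from words (by omega)
    have hdrop : (s - 1).toNat = s.toNat - 1 := by omega
    have hnew : (prev.zip (PySem.List.slice words (some (s - 1)) none)).map
          (fun pw => pw.1 ++ " " ++ pw.2) = pvWin words s.toNat := by
      rw [hslice, hdrop, hprev]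
      have := pvWin_step words (s.toNat - 1) (by omega)
      rw [this]
      congr 1
      omega
    rw [pvFoldl_append_map, pvRowA_eq_win words s (by omega)]
    have harith : s + ((c : Int) + 1) = (s + 1) + (c : Int) := by ring
    have := ih (s + 1) (chunks ++ pvWin words s.toNat) (pvWin words s.toNat)
      (by omega) (by congr 1; omega)
    simp only [hnew]
    push_cast
    rw [harith]
    push_cast at this
    exact this

-- ===== VERDICT (by name: the statement is the Claim_ definition above) =====
theorem create_word_chunks_py_spec : Claim_equal_create_word_chunks_py := by
  intro words max_chunk_size _
  unfold Spec_create_word_chunks_py create_word_chunks_py create_word_chunks_py_alt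
  by_cases h : max_chunk_size + 1 ≤ 2
  · rw [PySem.List.pyRange_one_eq_nil h]
    simp
  · have hc : max_chunk_size + 1 = 2 + ((max_chunk_size - 1).toNat : Int) := by omega
    rw [hc]
    exact pvLoop words (max_chunk_size - 1).toNat 2 ([] ++ words) words (by omega)
      (by rw [show Int.toNat 2 - 1 = 1 from rfl, pvWin_one])
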